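-- pv_equiv track=rewrite | github.com/zimmerman-team/DUCT | ZOOM/lib/tools.py | check_column_data_type
-- ===== SOURCE A (Python) =====
-- def check_column_data_type(field, dtypes):
--     """Check that the data types found in a column is appropiate for the heading that it was matched to.
--
--     Args:
--         field (str): column heading.
--         dtypes ([str]): list of dtypes found for a column heading.
--
--     Returns:
--         result (boolean), true or false if appropiate dtype found.
--         dtype_set ([str]), matching data types found for mapping.
--         conversion_dtype (str): the data type the column needs to be converted to.
--     """
--
--     dtypes = [(i[0]) for i in dtypes]
--     dtype_set = set()
--     result = False
--     if field == "country":
--         country_list = ["country(iso2)", "country(iso3)", "country(name)"]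
--         dtype_set = set(dtypes) & set(country_list)
--         result = bool(dtype_set)
--
--         if not result:
--             dtype_set = dtypes[0]
--         else:
--             indexes = []
--             dtype_set = list(dtype_set)
--
--             for i in range(len(dtype_set)):#looking for furthest forward data type found that is compatiable
--                 indexes.append(int(dtypes.index(dtype_set[i])))
--
--             indexes.sort()
--             dtype_set = dtypes[indexes[0]]#pointless??
--
--         return result, dtype_set,"country(iso2)"
--
--     elif field == "measure_value":
--         if "numeric" in dtypes:
--             return True, "numeric" , "numeric"
--         elif"text" in dtypes:
--             return True,"text" , "numeric"
--         else:
--             return False, dtypes[0], "numeric"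
--
--     elif field == "date_value":
--         if "date" in dtypes:
--             ###Future: include format of date
--             return True, "date" , "date"
--         else:
--             return False, dtypes[0] , "date"
--     else:
--         return True,"text","text"
-- ===== SOURCE B (Python) =====
-- def check_column_data_type(field, dtypes):
--     """Table-driven rewrite: one accepted-types list per field; the country branch
--     scans the column's dtypes in order for the first accepted one, the value
--     branches scan the accepted list by priority; opts[0] is the conversion type."""
--     firsts = [row[0] for row in dtypes]
--     if field == "country":
--         opts = ["country(iso2)", "country(iso3)", "country(name)"]
--         match = next((d for d in firsts if d in opts), None)
--     elif field in ("measure_value", "date_value"):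
--         opts = ["numeric", "text"] if field == "measure_value" else ["date"]
--         match = next((t for t in opts if t in firsts), None)
--     else:
--         return True, "text", "text"
--     if match is None:
--         return False, firsts[0], opts[0]
--     return True, match, opts[0]
-- ===== Notes on version B (the rewrite author's own statement) =====
-- stated objective: simpler
-- what changed: Replaces the per-field branch bodies (set intersection + index collection + sort for country, chained membership ifs for measure/date) with a single table-driven shape: an accepted-types list per field, first-match scan (over the column for country, over the priority list for the value fields), and opts[0] as the conversion type.
import Mathlib
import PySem

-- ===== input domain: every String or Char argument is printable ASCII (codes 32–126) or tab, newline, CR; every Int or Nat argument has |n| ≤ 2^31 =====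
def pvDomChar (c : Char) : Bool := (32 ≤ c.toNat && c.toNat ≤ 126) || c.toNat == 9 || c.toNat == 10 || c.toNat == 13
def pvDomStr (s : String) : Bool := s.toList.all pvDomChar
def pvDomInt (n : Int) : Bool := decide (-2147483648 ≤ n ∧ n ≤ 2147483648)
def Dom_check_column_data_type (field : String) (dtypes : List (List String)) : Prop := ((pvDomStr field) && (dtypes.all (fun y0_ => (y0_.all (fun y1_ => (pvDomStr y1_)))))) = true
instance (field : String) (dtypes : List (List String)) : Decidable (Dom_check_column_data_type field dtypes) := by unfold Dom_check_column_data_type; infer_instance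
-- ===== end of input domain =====

-- B replaces A's per-field branch bodies (set intersection + index collection + sort for
-- country; chained membership ifs for measure/date) by a table-driven first-match scan; simpler.


-- ===== PORT A =====
-- i[0] → (pyGet? i 0).getD "" : the IndexError case (an empty inner list) is excluded by Pre_.
def check_column_data_type (field : String) (dtypes : List (List String)) : Bool × String × String :=
  let dtypes := dtypes.map (fun i => (PySem.List.pyGet? i 0).getD "")
  if field == "country" then
    let country_list : List String := ["country(iso2)", "country(iso3)", "country(name)"]
    let dtype_set := PySem.Set.inter (PySem.Set.ofList dtypes) (PySem.Set.ofList country_list)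
    let result := !dtype_set.isEmpty
    if !result then
      (result, (PySem.List.pyGet? dtypes 0).getD "", "country(iso2)")
    else
      -- for i in range(len(dtype_set)): indexes.append(int(dtypes.index(dtype_set[i])))
      -- (dtypes.index succeeds: every element of dtype_set is drawn from dtypes)
      let indexes : List Int :=
        dtype_set.foldl (fun acc s => acc ++ [(((PySem.List.index? dtypes s).getD 0 : Nat) : Int)]) []
      let indexes := PySem.List.sorted indexes (fun x => x) false
      (result, (PySem.List.pyGet? dtypes ((PySem.List.pyGet? indexes 0).getD 0)).getD "", "country(iso2)")
  else if field == "measure_value" then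
    if dtypes.contains "numeric" then (true, "numeric", "numeric")
    else if dtypes.contains "text" then (true, "text", "numeric")
    else (false, (PySem.List.pyGet? dtypes 0).getD "", "numeric")
  else if field == "date_value" then
    if dtypes.contains "date" then (true, "date", "date")
    else (false, (PySem.List.pyGet? dtypes 0).getD "", "date")
  else
    (true, "text", "text")

-- ===== PORT B =====
-- shared tail of Source B's two table branches: None → (False, firsts[0], opts[0]); Some m → (True, m, opts[0])
def pvFinish (opts : List String) (m : Option String) (firsts : List String) : Bool × String × String :=
  match m with
  | none => (false, (PySem.List.pyGet? firsts 0).getD "", opts.headD "")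
  | some m => (true, m, opts.headD "")

def check_column_data_type_alt (field : String) (dtypes : List (List String)) : Bool × String × String :=
  let firsts := dtypes.map (fun row => (PySem.List.pyGet? row 0).getD "")
  if field == "country" then
    let opts : List String := ["country(iso2)", "country(iso3)", "country(name)"]
    pvFinish opts (firsts.find? (fun d => opts.contains d)) firsts
  else if field == "measure_value" || field == "date_value" then
    let opts : List String := if field == "measure_value" then ["numeric", "text"] else ["date"]
    pvFinish opts (opts.find? (fun t => firsts.contains t)) firsts
  else
    (true, "text", "text")

-- ===== PRECONDITION & SPEC =====
-- Pre_ excludes exactly the inputs where A raises IndexError: an empty inner list (i[0]),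
-- or an empty dtypes list reaching dtypes[0] in the three recognised field branches.
def Pre_check_column_data_type (field : String) (dtypes : List (List String)) : Prop :=
  (∀ row ∈ dtypes, row ≠ []) ∧
  ((field = "country" ∨ field = "measure_value" ∨ field = "date_value") → dtypes ≠ [])
instance (field : String) (dtypes : List (List String)) : Decidable (Pre_check_column_data_type field dtypes) := by unfold Pre_check_column_data_type; infer_instance
def pvWitness_check_column_data_type : String × List (List String) :=
  ("country", [["text"], ["country(iso3)"], ["country(iso2)"]])
def Spec_check_column_data_type (field : String) (dtypes : List (List String)) (out : Bool × String × String) : Prop := out = check_column_data_type_alt field dtypes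
instance (field : String) (dtypes : List (List String)) (out : Bool × String × String) : Decidable (Spec_check_column_data_type field dtypes out) := by unfold Spec_check_column_data_type; infer_instance

-- ===== CLAIM (what is proved, stated in full; the proofs are below) =====
def Claim_equal_check_column_data_type : Prop := ∀ (field : String) (dtypes : List (List String)), Dom_check_column_data_type field dtypes → Pre_check_column_data_type field dtypes → Spec_check_column_data_type field dtypes (check_column_data_type field dtypes)

-- ===== LEMMAS AND PROOFS =====

-- every element of the intersection list is an element of fs satisfying the country predicate
theorem pv_mem_inter {fs C : List String} {s : String}
    (hs : s ∈ PySem.Set.inter (PySem.Set.ofList fs) C) : s ∈ fs ∧ C.contains s = true := by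
  have h := List.mem_filter.mp hs
  exact ⟨(PySem.Set.mem_ofList fs s).mp h.1, by simpa [PySem.Set.contains] using h.2⟩

-- first-match minimality: any index of a hit is at least the prefix length before the first hit
theorem pv_idx_ge {fs as bs : List String} {m s : String} {p : String → Bool}
    (hfs : fs = as ++ m :: bs) (has : ∀ a ∈ as, (!p a) = true)
    (ps : p s = true) {ks : Nat} (hks : PySem.List.index? fs s = some ks) :
    as.length ≤ ks := by
  by_contra hlt
  have hlt : ks < as.length := Nat.lt_of_not_le hlt
  obtain ⟨hklt, hgetk, -⟩ := PySem.List.getElem_of_index?_eq_some hks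
  have hklt' : ks < (as ++ m :: bs).length := hfs ▸ hklt
  have h1 : (as ++ m :: bs)[ks]'hklt' = as[ks]'hlt := List.getElem_append_left hlt
  have h2 : as[ks]'hlt = s := by
    rw [← h1]
    have := hgetk
    simp only [hfs] at this ⊢
    exact this
  have := has _ (h2 ▸ List.getElem_mem hlt)
  simp [ps] at this

-- The country branch of A equals the first-in-column scan of B, for a nonempty column.
theorem pv_country_eq (fs : List String) :
    (let dtype_set := PySem.Set.inter (PySem.Set.ofList fs)
        (PySem.Set.ofList ["country(iso2)", "country(iso3)", "country(name)"])
     let result := !dtype_set.isEmpty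
     if !result then
       (result, (PySem.List.pyGet? fs 0).getD "", ("country(iso2)" : String))
     else
       let indexes : List Int :=
         dtype_set.foldl (fun acc s => acc ++ [(((PySem.List.index? fs s).getD 0 : Nat) : Int)]) []
       let indexes := PySem.List.sorted indexes (fun x => x) false
       (result, (PySem.List.pyGet? fs ((PySem.List.pyGet? indexes 0).getD 0)).getD "", "country(iso2)"))
    = pvFinish ["country(iso2)", "country(iso3)", "country(name)"]
        (fs.find? (fun d => (["country(iso2)", "country(iso3)", "country(name)"] : List String).contains d)) fs := by
  have hC : PySem.Set.ofList ["country(iso2)", "country(iso3)", "country(name)"]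
      = ["country(iso2)", "country(iso3)", "country(name)"] := by decide
  simp only [hC]
  cases hfind : fs.find? (fun d => (["country(iso2)", "country(iso3)", "country(name)"] : List String).contains d) with
  | none =>
    have hinter : PySem.Set.inter (PySem.Set.ofList fs)
        (["country(iso2)", "country(iso3)", "country(name)"] : List String) = [] := by
      apply List.filter_eq_nil_iff.mpr
      intro a ha
      have hafs : a ∈ fs := (PySem.Set.mem_ofList fs a).mp ha
      have := List.find?_eq_none.mp hfind a hafs
      simpa [PySem.Set.contains] using this
    simp [hinter, pvFinish]
  | some m =>
    obtain ⟨pm, as, bs, hfs, has⟩ := List.find?_eq_some_iff_append.mp hfind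
    have hmfs : m ∈ fs := by rw [hfs]; simp
    have hmi : m ∈ PySem.Set.inter (PySem.Set.ofList fs)
        (["country(iso2)", "country(iso3)", "country(name)"] : List String) := by
      apply List.mem_filter.mpr
      exact ⟨(PySem.Set.mem_ofList fs m).mpr hmfs, by simpa [PySem.Set.contains] using pm⟩
    have hne : PySem.Set.inter (PySem.Set.ofList fs)
        (["country(iso2)", "country(iso3)", "country(name)"] : List String) ≠ [] := by
      intro hnil; rw [hnil] at hmi; simp at hmi
    obtain ⟨i0, irest, hinter⟩ := List.exists_cons_of_ne_nil hne
    have hidx : (PySem.Set.inter (PySem.Set.ofList fs)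
          (["country(iso2)", "country(iso3)", "country(name)"] : List String)).foldl
          (fun acc s => acc ++ [(((PySem.List.index? fs s).getD 0 : Nat) : Int)]) []
        = (PySem.Set.inter (PySem.Set.ofList fs)
          (["country(iso2)", "country(iso3)", "country(name)"] : List String)).map
          (fun s => (((PySem.List.index? fs s).getD 0 : Nat) : Int)) := by
      simpa using PySem.List.foldl_append_singleton_eq_map
        (fun s => (((PySem.List.index? fs s).getD 0 : Nat) : Int))
        (PySem.Set.inter (PySem.Set.ofList fs)
          (["country(iso2)", "country(iso3)", "country(name)"] : List String)) []
    rw [hinter] at hidx hmi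
    -- index of the first match
    have hkm : PySem.List.index? fs m = some as.length := by
      apply (PySem.List.index?_eq_some_iff fs m as.length).mpr
      refine ⟨as, bs, hfs, rfl, fun hmem => ?_⟩
      have h' := has m hmem
      rw [Bool.not_eq_true'] at h'
      rw [h'] at pm
      exact Bool.false_ne_true pm
    -- the sorted index list is nonempty
    obtain ⟨j, t, hsort⟩ : ∃ j t,
        PySem.List.sorted ((i0 :: irest).map
          (fun s => (((PySem.List.index? fs s).getD 0 : Nat) : Int))) (fun x => x) false = j :: t := by
      cases hs : PySem.List.sorted ((i0 :: irest).map
          (fun s => (((PySem.List.index? fs s).getD 0 : Nat) : Int))) (fun x => x) false with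
      | nil => simp [PySem.List.sorted_eq_nil_iff] at hs
      | cons a b => exact ⟨a, b, rfl⟩
    have hjmem : j ∈ (i0 :: irest).map (fun s => (((PySem.List.index? fs s).getD 0 : Nat) : Int)) :=
      (PySem.List.sorted_perm _ _ _).subset (hsort ▸ List.mem_cons_self)
    obtain ⟨s, hsinter, hjs⟩ := List.mem_map.mp hjmem
    obtain ⟨hsfs, hps⟩ := pv_mem_inter (hinter ▸ hsinter)
    obtain ⟨ks, hks⟩ := Option.isSome_iff_exists.mp ((PySem.List.index?_isSome_iff fs s).mpr hsfs)
    have hj_eq : j = (ks : Int) := by rw [← hjs, hks]; rfl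
    have hge : as.length ≤ ks := pv_idx_ge hfs has hps hks
    have hjle : j ≤ ((as.length : Nat) : Int) :=
      PySem.List.key_head_sorted_le
        (List.map (fun s => (((PySem.List.index? fs s).getD 0 : Nat) : Int)) (i0 :: irest))
        (fun x : Int => x) hsort _
        (List.mem_map.mpr ⟨m, hmi, by rw [hkm]; rfl⟩)
    have hj : j = ((as.length : Nat) : Int) := by omega
    have hget : (PySem.List.pyGet? fs j).getD "" = m := by
      rw [hj, hfs, PySem.List.pyGet?_append_length]; rfl
    simp only [hinter, hidx, List.isEmpty_cons, Bool.not_false, Bool.not_true,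
      Bool.false_eq_true, if_false, hsort, PySem.List.pyGet?_zero_cons, Option.getD_some,
      hget, pvFinish, List.headD_cons]

-- measure_value: A's membership chain = B's priority scan over ["numeric", "text"]
theorem pv_two (fs : List String) :
    (if fs.contains "numeric" = true then ((true : Bool), ("numeric" : String), ("numeric" : String))
     else if fs.contains "text" = true then (true, "text", "numeric")
     else (false, (PySem.List.pyGet? fs 0).getD "", "numeric"))
    = pvFinish ["numeric", "text"] (List.find? (fun t => fs.contains t) ["numeric", "text"]) fs := by
  by_cases hn : "numeric" ∈ fs <;> by_cases ht : "text" ∈ fs <;>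
    simp [hn, ht, pvFinish]

-- date_value: A's membership test = B's priority scan over ["date"]
theorem pv_one (fs : List String) :
    (if fs.contains "date" = true then ((true : Bool), ("date" : String), ("date" : String))
     else (false, (PySem.List.pyGet? fs 0).getD "", "date"))
    = pvFinish ["date"] (List.find? (fun t => fs.contains t) ["date"]) fs := by
  by_cases hd : "date" ∈ fs <;> simp [hd, pvFinish]

theorem check_column_data_type_spec : Claim_equal_check_column_data_type := by
  intro field dtypes _ _
  unfold Spec_check_column_data_type check_column_data_type check_column_data_type_alt
  by_cases h1 : field = "country"
  · subst h1
    exact pv_country_eq _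
  · by_cases h2 : field = "measure_value"
    · subst h2
      exact pv_two _
    · by_cases h3 : field = "date_value"
      · subst h3
        exact pv_one _
      · simp [beq_iff_eq, h1, h2, h3]
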